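-- pv_equiv track=rewrite | github.com/danilocsm/algorithms | codigos/queue128.py | solve
-- ===== SOURCE A (Python) =====
-- def fat(n):
--
-- 	if n==1 or n==0:
-- 		return 1
-- 	else:
-- 		return fat(n-1)*n
--
-- def bt(left,right,not_seen,n,p,r):
--
-- 	if left<p or right<r or not_seen<0 or p<0 or r<0:
-- 		return 0
--
-- 	if left==0 and right==0:
-- 		if p>0 or r>0:
-- 			return 0
-- 		else:
-- 			return fat(not_seen)
--
-- 	_sum = 0
-- 	for new_left in range(0,left):
--
-- 		new_not_seen = (left-1) - new_left + not_seen
-- 		_sum += bt(new_left,right,new_not_seen,n,p-1,r)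
--
-- 	for new_right in range(0,right):
--
-- 		new_not_seen = (right-1) - new_right + not_seen
-- 		_sum += bt(left,new_right,new_not_seen,n,p,r-1)
--
-- 	_sum += not_seen*bt(left,right,not_seen-1,n,p,r)
--
-- 	return _sum
--
-- def solve(n,p,r):
--
-- 	if n == 1:
-- 		if p==1 and r==1:
-- 			return 1
-- 		else:
-- 			return 0
--
-- 	if n==2:
-- 		if p==1 and r==2:
-- 			return 1
-- 		if p==2 and r==1:
-- 			return 1
-- 		else:
-- 			return 0
--
-- 	_sum = 0
--
-- 	for i in range(1,n+1):
-- 		for j in range(i+1,n+1):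
-- 			left = i-1
-- 			right = n-j
-- 			not_seen = n-2-left-right
-- 			_sum += bt(left, right, not_seen, n, p-1, r-2)
-- 			_sum += bt(left, right, not_seen, n, p-2, r-1)
--
-- 	return _sum
-- ===== SOURCE B (Python) =====
-- def g(row, k):
--     return row[k] if 0 <= k < len(row) else 0
--
-- def up_stir(row, l, kc):
--     # stir row l-1 -> stir row l (records recurrence), truncated to columns 0..min(l, kc)
--     return [(l - 1) * (row[k] if k < len(row) else 0) + (row[k - 1] if k >= 1 else 0)
--             for k in range(min(l, kc) + 1)]
--
-- def up_pas(row, a):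
--     # Pascal row a-1 -> Pascal row a, a >= 1
--     return [(row[b] if b < a else 0) + (row[b - 1] if b >= 1 else 0)
--             for b in range(a + 1)]
--
-- def solve(n, p, r):
--     if n == 1:
--         return 1 if (p == 1 and r == 1) else 0
--     if n == 2:
--         return 1 if ((p == 1 and r == 2) or (p == 2 and r == 1)) else 0
--     m = n - 2
--     # record counts: sa[l] = stir(l, p-1), sb[l] = stir(l, p-2),
--     #                ta[l] = stir(l, r-2), tb[l] = stir(l, r-1);
--     # only columns up to kc are ever read, so rows are truncated there
--     kc = max(p - 1, r - 1, 0)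
--     sa = []; sb = []; ta = []; tb = []
--     row = [1]
--     for l in range(0, m + 1):
--         if l > 0:
--             row = up_stir(row, l, kc)
--         sa.append(g(row, p - 1)); sb.append(g(row, p - 2))
--         ta.append(g(row, r - 2)); tb.append(g(row, r - 1))
--     fac = [1]
--     for i in range(1, m + 1):
--         fac.append(fac[i - 1] * i)
--     cm = [1]
--     for a in range(1, m + 1):
--         cm = up_pas(cm, a)          # Pascal row m
--     total = 0
--     crow = [1]
--     for a in range(0, m + 1):       # a = m - l
--         if a > 0:
--             crow = up_pas(crow, a)  # Pascal row a
--         l = m - a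
--         for t in range(0, a + 1):
--             s = sa[l] * ta[t] + sb[l] * tb[t]
--             if s:
--                 total += s * (g(cm, l) * g(crow, t) * g(fac, a - t))
--     return total
-- ===== Notes on version B (the rewrite author's own statement) =====
-- stated objective: alternative
-- what changed: A's backtracking recursion bt is replaced by its combinatorial closed form -- record counts (Stirling-cycle rows) times binomial coefficients times a factorial -- read off from incrementally built table rows, so B does table lookups and arithmetic instead of recursing.
import Mathlib
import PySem

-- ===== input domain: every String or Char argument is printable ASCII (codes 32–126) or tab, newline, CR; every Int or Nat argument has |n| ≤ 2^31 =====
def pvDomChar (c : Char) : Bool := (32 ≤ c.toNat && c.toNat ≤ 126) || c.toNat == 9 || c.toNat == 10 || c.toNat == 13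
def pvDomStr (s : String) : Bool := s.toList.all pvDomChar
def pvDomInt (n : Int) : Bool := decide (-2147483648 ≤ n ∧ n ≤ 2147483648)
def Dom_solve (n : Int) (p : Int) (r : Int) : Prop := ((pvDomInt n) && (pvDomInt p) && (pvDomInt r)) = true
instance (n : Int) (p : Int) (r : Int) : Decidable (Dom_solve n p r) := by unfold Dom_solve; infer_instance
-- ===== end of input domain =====

-- B replaces A's backtracking recursion `bt` by its combinatorial closed form
-- (record counts x binomial coefficients x a factorial), read off from incrementally
-- built table rows instead of recursing; objective: alternative algorithm.

-- ===== PORT A =====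
def fat (n : Int) : Int :=
  if n = 1 ∨ n = 0 then 1
  else if n < 0 then 0  -- unreachable from `solve` (Python's fat never terminates on negatives; bt guards not_seen ≥ 0)
  else fat (n - 1) * n
termination_by n.toNat
decreasing_by omega

def bt (left right not_seen n p r : Int) : Int :=
  if left < p ∨ right < r ∨ not_seen < 0 ∨ p < 0 ∨ r < 0 then 0
  else if left = 0 ∧ right = 0 then
    (if 0 < p ∨ 0 < r then 0 else fat not_seen)
  else
    let s1 := (PySem.List.pyRange 0 left 1).attach.foldl
      (fun acc x => acc + bt x.1 right ((left - 1) - x.1 + not_seen) n (p - 1) r) 0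
    let s2 := (PySem.List.pyRange 0 right 1).attach.foldl
      (fun acc x => acc + bt left x.1 ((right - 1) - x.1 + not_seen) n p (r - 1)) 0
    s1 + s2 + not_seen * bt left right (not_seen - 1) n p r
termination_by (left + right + not_seen).toNat
decreasing_by
  · have := PySem.List.mem_pyRange_one.mp x.2; omega
  · have := PySem.List.mem_pyRange_one.mp x.2; omega
  · omega

def solve (n : Int) (p : Int) (r : Int) : Int :=
  if n = 1 then (if p = 1 ∧ r = 1 then 1 else 0)
  else if n = 2 then
    (if p = 1 ∧ r = 2 then 1 else if p = 2 ∧ r = 1 then 1 else 0)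
  else
    (PySem.List.pyRange 1 (n + 1) 1).foldl (fun acc i =>
      (PySem.List.pyRange (i + 1) (n + 1) 1).foldl (fun acc2 j =>
        acc2 + bt (i - 1) (n - j) (n - 2 - (i - 1) - (n - j)) n (p - 1) (r - 2)
             + bt (i - 1) (n - j) (n - 2 - (i - 1) - (n - j)) n (p - 2) (r - 1)) acc) 0

-- ===== PORT B =====
def gRow (row : List Int) (k : Int) : Int :=
  if 0 ≤ k ∧ k < (row.length : Int) then PySem.List.pyGetD row k 0 else 0

def upStir (row : List Int) (l kc : Int) : List Int :=
  (PySem.List.pyRange 0 (min l kc + 1) 1).map (fun k =>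
    (l - 1) * (if k < (row.length : Int) then PySem.List.pyGetD row k 0 else 0)
    + (if 1 ≤ k then PySem.List.pyGetD row (k - 1) 0 else 0))

def upPas (row : List Int) (a : Int) : List Int :=
  (PySem.List.pyRange 0 (a + 1) 1).map (fun b =>
    (if b < a then PySem.List.pyGetD row b 0 else 0)
    + (if 1 ≤ b then PySem.List.pyGetD row (b - 1) 0 else 0))

def solve_alt (n : Int) (p : Int) (r : Int) : Int :=
  if n = 1 then (if p = 1 ∧ r = 1 then 1 else 0)
  else if n = 2 then (if (p = 1 ∧ r = 2) ∨ (p = 2 ∧ r = 1) then 1 else 0)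
  else
    let m := n - 2
    let kc := max (max (p - 1) (r - 1)) 0
    let st := (PySem.List.pyRange 0 (m + 1) 1).foldl
      (fun (s : List Int × List Int × List Int × List Int × List Int) l =>
        let row := if 0 < l then upStir s.1 l kc else s.1
        (row, s.2.1 ++ [gRow row (p - 1)], s.2.2.1 ++ [gRow row (p - 2)],
         s.2.2.2.1 ++ [gRow row (r - 2)], s.2.2.2.2 ++ [gRow row (r - 1)]))
      ([1], [], [], [], [])
    let sa := st.2.1
    let sb := st.2.2.1
    let ta := st.2.2.2.1
    let tb := st.2.2.2.2
    let fac := (PySem.List.pyRange 1 (m + 1) 1).foldl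
      (fun fl i => fl ++ [PySem.List.pyGetD fl (i - 1) 0 * i]) [1]
    let cm := (PySem.List.pyRange 1 (m + 1) 1).foldl (fun rw a => upPas rw a) [1]
    let res := (PySem.List.pyRange 0 (m + 1) 1).foldl
      (fun (s : List Int × Int) a =>
        let crow := if 0 < a then upPas s.1 a else s.1
        let l := m - a
        let total := (PySem.List.pyRange 0 (a + 1) 1).foldl (fun tt t =>
          let sv := PySem.List.pyGetD sa l 0 * PySem.List.pyGetD ta t 0
                    + PySem.List.pyGetD sb l 0 * PySem.List.pyGetD tb t 0
          if sv ≠ 0 then tt + sv * (gRow cm l * gRow crow t * gRow fac (a - t)) else tt) s.2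
        (crow, total)) ([1], 0)
    res.2

-- ===== PRECONDITION & SPEC =====
def Spec_solve (n : Int) (p : Int) (r : Int) (out : Int) : Prop := out = solve_alt n p r
instance (n : Int) (p : Int) (r : Int) (out : Int) : Decidable (Spec_solve n p r out) := by unfold Spec_solve; infer_instance

-- ===== CLAIM (what is proved, stated in full; the proofs are below) =====
def Claim_equal_solve : Prop := ∀ (n : Int) (p : Int) (r : Int), Dom_solve n p r → Spec_solve n p r (solve n p r)

-- ===== LEMMAS AND PROOFS =====

-- stir l k = number of permutations of l elements with exactly k left-to-right maxima
-- (unsigned Stirling numbers of the first kind, records recurrence)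
def stir : Nat → Nat → Int
  | 0, 0 => 1
  | 0, _ + 1 => 0
  | l + 1, 0 => l * stir l 0
  | l + 1, k + 1 => l * stir l (k + 1) + stir l k

-- stir with an Int index, 0 outside [0, l]
def stirI (l : Nat) (p : Int) : Int := if 0 ≤ p ∧ p ≤ (l : Int) then stir l p.toNat else 0

-- the closed form that bt computes
def FF (l r ns : Nat) (p q : Int) : Int :=
  stirI l p * stirI r q * ((l + r + ns).choose l : Int) * ((r + ns).choose r : Int) * (ns.factorial : Int)

theorem fat_natCast (ns : Nat) : fat (ns : Int) = (ns.factorial : Int) := by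
  induction ns with
  | zero => rw [fat]; simp
  | succ k ih =>
    rcases Nat.eq_zero_or_pos k with hk | hk
    · subst hk; rw [fat]; simp [Nat.factorial]
    · rw [fat]
      have h1 : ¬((k + 1 : Nat) = (1 : Int) ∨ ((k + 1 : Nat) : Int) = 0) := by omega
      have h2 : ¬(((k + 1 : Nat) : Int) < 0) := by omega
      rw [if_neg h1, if_neg h2]
      have h3 : ((k + 1 : Nat) : Int) - 1 = (k : Int) := by push_cast; ring
      rw [h3, ih, Nat.factorial_succ]
      push_cast; ring



theorem stir_eq_zero {l k : Nat} (h : l < k) : stir l k = 0 := by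
  induction l generalizing k with
  | zero => cases k with
    | zero => omega
    | succ m => rfl
  | succ m ih => cases k with
    | zero => omega
    | succ j => rw [stir, ih (by omega), ih (by omega)]; ring

theorem stirI_rec (l : Nat) (p : Int) :
    stirI (l + 1) p = l * stirI l p + stirI l (p - 1) := by
  unfold stirI
  by_cases h0 : 0 ≤ p
  · by_cases h1 : p ≤ (l : Int)
    · -- 0 ≤ p ≤ l : all three in range except p-1 maybe negative (p=0)
      rcases eq_or_lt_of_le h0 with he | hlt
      · -- p = 0
        have : p = 0 := he.symm; subst this
        simp only [show (0:Int).toNat = 0 from rfl]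
        rw [if_pos ⟨by omega, by omega⟩, if_pos ⟨by omega, by omega⟩, if_neg (by omega)]
        cases l with
        | zero => simp [stir]
        | succ m => simp [stir]
      · -- 0 < p
        obtain ⟨k, hk⟩ : ∃ k : Nat, p = (k + 1 : Nat) := ⟨(p - 1).toNat, by omega⟩
        subst hk
        rw [if_pos ⟨by omega, by omega⟩, if_pos ⟨by omega, by omega⟩]
        have h4 : ((k + 1 : Nat) : Int) - 1 = (k : Nat) := by push_cast; ring
        rw [h4]
        rw [if_pos ⟨by omega, by omega⟩]
        have h5 : ((k + 1 : Nat) : Int).toNat = k + 1 := by omega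
        have h6 : ((k : Nat) : Int).toNat = k := by omega
        rw [h5, h6, stir]
    · -- p > l : cases p = l+1 or p > l+1
      by_cases h2 : p ≤ (l : Int) + 1
      · have hp : p = (l : Int) + 1 := by omega
        subst hp
        rw [if_pos ⟨by omega, by push_cast; omega⟩, if_neg (by omega)]
        have h3 : ((l : Int) + 1 - 1) = (l : Int) := by ring
        rw [h3, if_pos ⟨by omega, by omega⟩]
        have h5 : ((l : Int) + 1).toNat = l + 1 := by omega
        have h6 : ((l : Int)).toNat = l := by omega
        rw [h5, h6]
        cases l with
        | zero => simp [stir]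
        | succ m =>
          have : stir (m + 1 + 1) (m + 1 + 1) = (m+1) * stir (m+1) (m+1+1) + stir (m+1) (m+1) := by
            rw [stir]; push_cast; ring
          rw [this]
          have hz : stir (m + 1) (m + 1 + 1) = 0 := stir_eq_zero (by omega)
          rw [hz]; ring
      · rw [if_neg (by push_cast; omega), if_neg (by omega), if_neg (by omega)]; ring
  · rw [if_neg (by omega), if_neg (by omega), if_neg (by omega)]; ring

theorem stirI_star (l : Nat) (p : Int) :
    (l : ℚ) * (stirI l p : ℚ) =
      ∑ k ∈ Finset.range l, (stirI k (p - 1) : ℚ) * ((l.factorial : ℚ) / (k.factorial : ℚ)) := by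
  induction l with
  | zero => simp
  | succ l ih =>
    rw [Finset.sum_range_succ]
    have hstep : ∀ k ∈ Finset.range l,
        (stirI k (p - 1) : ℚ) * (((l + 1).factorial : ℚ) / (k.factorial : ℚ))
          = ((l : ℚ) + 1) * ((stirI k (p - 1) : ℚ) * ((l.factorial : ℚ) / (k.factorial : ℚ))) := by
      intro k _
      rw [Nat.factorial_succ]; push_cast; ring
    rw [Finset.sum_congr rfl hstep, ← Finset.mul_sum, ← ih]
    have hl : (l.factorial : ℚ) ≠ 0 := by
      exact_mod_cast Nat.factorial_pos l |>.ne'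
    have h1 : (((l + 1).factorial : ℚ)) / (l.factorial : ℚ) = (l : ℚ) + 1 := by
      rw [Nat.factorial_succ]; push_cast; field_simp
    rw [h1]
    have hr : (stirI (l + 1) p : ℚ) = (l : ℚ) * (stirI l p : ℚ) + (stirI l (p - 1) : ℚ) := by
      have := stirI_rec l p
      exact_mod_cast congrArg (Int.cast : Int → ℚ) this
    push_cast [hr]
    ring


theorem FF_q (l r ns : Nat) (p q : Int) :
    (FF l r ns p q : ℚ) =
      (stirI l p : ℚ) * (stirI r q : ℚ) * ((l + r + ns).factorial : ℚ)
        / ((l.factorial : ℚ) * (r.factorial : ℚ)) := by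
  unfold FF
  have hc1 : ((l + r + ns).choose l : ℚ)
      = ((l + r + ns).factorial : ℚ) / ((l.factorial : ℚ) * ((r + ns).factorial : ℚ)) := by
    have := Nat.cast_choose ℚ (show l ≤ l + r + ns by omega)
    rwa [show l + r + ns - l = r + ns by omega] at this
  have hc2 : ((r + ns).choose r : ℚ)
      = ((r + ns).factorial : ℚ) / ((r.factorial : ℚ) * (ns.factorial : ℚ)) := by
    have := Nat.cast_choose ℚ (show r ≤ r + ns by omega)
    rwa [show r + ns - r = ns by omega] at this
  have h1 : (l.factorial : ℚ) ≠ 0 := by exact_mod_cast (Nat.factorial_pos l).ne'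
  have h2 : (r.factorial : ℚ) ≠ 0 := by exact_mod_cast (Nat.factorial_pos r).ne'
  have h3 : (ns.factorial : ℚ) ≠ 0 := by exact_mod_cast (Nat.factorial_pos ns).ne'
  have h4 : ((r + ns).factorial : ℚ) ≠ 0 := by exact_mod_cast (Nat.factorial_pos (r + ns)).ne'
  push_cast [hc1, hc2]
  field_simp

theorem FF_main (l r ns : Nat) (h : ¬(l = 0 ∧ r = 0)) (p q : Int) :
    FF l r ns p q =
      (∑ k ∈ Finset.range l, FF k r (l - 1 - k + ns) (p - 1) q)
      + (∑ k ∈ Finset.range r, FF l k (r - 1 - k + ns) p (q - 1))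
      + (ns : Int) * FF l r (ns - 1) p q := by
  apply Int.cast_injective (α := ℚ)
  push_cast
  rw [FF_q]
  have hl : (l.factorial : ℚ) ≠ 0 := by exact_mod_cast (Nat.factorial_pos l).ne'
  have hr : (r.factorial : ℚ) ≠ 0 := by exact_mod_cast (Nat.factorial_pos r).ne'
  have hsum1 : ∑ k ∈ Finset.range l, (FF k r (l - 1 - k + ns) (p - 1) q : ℚ)
      = ((l : ℚ) * (stirI l p : ℚ)) *
        ((stirI r q : ℚ) * ((l + r + ns - 1).factorial : ℚ) / ((l.factorial : ℚ) * (r.factorial : ℚ))) := by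
    have step : ∀ k ∈ Finset.range l, (FF k r (l - 1 - k + ns) (p - 1) q : ℚ)
        = ((stirI k (p - 1) : ℚ) * ((l.factorial : ℚ) / (k.factorial : ℚ))) *
          ((stirI r q : ℚ) * ((l + r + ns - 1).factorial : ℚ) / ((l.factorial : ℚ) * (r.factorial : ℚ))) := by
      intro k hk
      have hk' : k < l := Finset.mem_range.mp hk
      rw [FF_q]
      rw [show k + r + (l - 1 - k + ns) = l + r + ns - 1 by omega]
      have hkf : (k.factorial : ℚ) ≠ 0 := by exact_mod_cast (Nat.factorial_pos k).ne'
      field_simp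
    rw [Finset.sum_congr rfl step, ← Finset.sum_mul, ← stirI_star]
  have hsum2 : ∑ k ∈ Finset.range r, (FF l k (r - 1 - k + ns) p (q - 1) : ℚ)
      = ((r : ℚ) * (stirI r q : ℚ)) *
        ((stirI l p : ℚ) * ((l + r + ns - 1).factorial : ℚ) / ((l.factorial : ℚ) * (r.factorial : ℚ))) := by
    have step : ∀ k ∈ Finset.range r, (FF l k (r - 1 - k + ns) p (q - 1) : ℚ)
        = ((stirI k (q - 1) : ℚ) * ((r.factorial : ℚ) / (k.factorial : ℚ))) *
          ((stirI l p : ℚ) * ((l + r + ns - 1).factorial : ℚ) / ((l.factorial : ℚ) * (r.factorial : ℚ))) := by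
      intro k hk
      have hk' : k < r := Finset.mem_range.mp hk
      rw [FF_q]
      rw [show l + k + (r - 1 - k + ns) = l + r + ns - 1 by omega]
      have hkf : (k.factorial : ℚ) ≠ 0 := by exact_mod_cast (Nat.factorial_pos k).ne'
      field_simp
    rw [Finset.sum_congr rfl step, ← Finset.sum_mul, ← stirI_star]
  rw [hsum1, hsum2]
  have hfac : ((l + r + ns).factorial : ℚ)
      = ((l : ℚ) + (r : ℚ) + (ns : ℚ)) * ((l + r + ns - 1).factorial : ℚ) := by
    rw [show l + r + ns = (l + r + ns - 1) + 1 by omega, Nat.factorial_succ]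
    push_cast [show l + r + ns - 1 + 1 = l + r + ns by omega]
    ring
  rw [hfac]
  cases ns with
  | zero =>
    rw [FF_q]
    push_cast
    field_simp
    ring
  | succ m =>
    rw [FF_q]
    rw [show l + r + (m + 1 - 1) = l + r + (m + 1) - 1 by omega]
    push_cast
    field_simp

theorem sum_map_range_eq (h : Nat → Int) (c : Nat) :
    (List.map h (List.range c)).sum = ∑ k ∈ Finset.range c, h k := rfl

theorem FF_eq_zero {l r ns : Nat} {p q : Int}
    (h : ¬(0 ≤ p ∧ p ≤ (l : Int)) ∨ ¬(0 ≤ q ∧ q ≤ (r : Int))) : FF l r ns p q = 0 := by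
  unfold FF stirI
  rcases h with h | h
  · rw [if_neg h]; ring
  · rw [if_neg h]; ring

theorem bt_eq_FF (l r ns : Nat) (nn p q : Int) :
    bt (l : Int) (r : Int) (ns : Int) nn p q = FF l r ns p q := by
  suffices H : ∀ N, ∀ l r ns : Nat, ∀ nn p q : Int, l + r + ns = N →
      bt (l : Int) (r : Int) (ns : Int) nn p q = FF l r ns p q by
    exact H _ l r ns nn p q rfl
  intro N
  induction N using Nat.strong_induction_on with
  | _ N IH =>
    intro l r ns nn p q hsum
    rw [bt]
    by_cases hg : ((l : Int) < p ∨ (r : Int) < q ∨ (ns : Int) < 0 ∨ p < 0 ∨ q < 0)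
    · rw [if_pos hg]
      have : ¬(0 ≤ p ∧ p ≤ (l : Int)) ∨ ¬(0 ≤ q ∧ q ≤ (r : Int)) := by omega
      exact (FF_eq_zero this).symm
    · rw [if_neg hg]
      have hp : 0 ≤ p ∧ p ≤ (l : Int) := by omega
      have hq : 0 ≤ q ∧ q ≤ (r : Int) := by omega
      by_cases hb : ((l : Int) = 0 ∧ (r : Int) = 0)
      · rw [if_pos hb]
        have hl0 : l = 0 := by omega
        have hr0 : r = 0 := by omega
        subst hl0; subst hr0
        by_cases hpq : (0 < p ∨ 0 < q)
        · rw [if_pos hpq]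
          have : ¬(0 ≤ p ∧ p ≤ ((0 : Nat) : Int)) ∨ ¬(0 ≤ q ∧ q ≤ ((0 : Nat) : Int)) := by omega
          exact (FF_eq_zero this).symm
        · rw [if_neg hpq]
          have hp0 : p = 0 := by omega
          have hq0 : q = 0 := by omega
          subst hp0; subst hq0
          rw [fat_natCast]
          unfold FF stirI
          simp [stir]
      · rw [if_neg hb]
        dsimp only
        -- the two loops as sums
        rw [List.foldl_attach (f := fun acc x => acc + bt x (r : Int) (((l : Int) - 1) - x + (ns : Int)) nn (p - 1) q),
            List.foldl_attach (f := fun acc x => acc + bt (l : Int) x (((r : Int) - 1) - x + (ns : Int)) nn p (q - 1)),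
            PySem.List.foldl_add, PySem.List.foldl_add,
            PySem.List.pyRange_zero_natCast l, PySem.List.pyRange_zero_natCast r,
            List.map_map, List.map_map, sum_map_range_eq, sum_map_range_eq]
        have hlr : ¬(l = 0 ∧ r = 0) := by
          intro ⟨h1, h2⟩; exact hb (by simp [h1, h2])
        have e1 : ∀ k ∈ Finset.range l,
            ((fun x => bt x (r : Int) (((l : Int) - 1) - x + (ns : Int)) nn (p - 1) q) ∘ (fun k : Nat => (k : Int))) k
              = FF k r (l - 1 - k + ns) (p - 1) q := by
          intro k hk
          have hkl : k < l := Finset.mem_range.mp hk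
          simp only [Function.comp]
          rw [show ((l : Int) - 1) - (k : Int) + (ns : Int) = ((l - 1 - k + ns : Nat) : Int) by omega]
          exact IH (k + r + (l - 1 - k + ns)) (by omega) k r (l - 1 - k + ns) nn (p - 1) q rfl
        have e2 : ∀ k ∈ Finset.range r,
            ((fun x => bt (l : Int) x (((r : Int) - 1) - x + (ns : Int)) nn p (q - 1)) ∘ (fun k : Nat => (k : Int))) k
              = FF l k (r - 1 - k + ns) p (q - 1) := by
          intro k hk
          have hkr : k < r := Finset.mem_range.mp hk
          simp only [Function.comp]
          rw [show ((r : Int) - 1) - (k : Int) + (ns : Int) = ((r - 1 - k + ns : Nat) : Int) by omega]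
          exact IH (l + k + (r - 1 - k + ns)) (by omega) l k (r - 1 - k + ns) nn p (q - 1) rfl
        rw [Finset.sum_congr rfl e1, Finset.sum_congr rfl e2]
        have e3 : (ns : Int) * bt (l : Int) (r : Int) ((ns : Int) - 1) nn p q
            = (ns : Int) * FF l r (ns - 1) p q := by
          cases ns with
          | zero => simp
          | succ m =>
            rw [show ((m + 1 : Nat) : Int) - 1 = (m : Int) by omega]
            rw [IH (l + r + m) (by omega) l r m nn p q rfl]
            norm_num
        rw [e3]
        rw [FF_main l r ns hlr p q]
        ring

theorem foldl_add2 {α : Type} (l : List α) (f g : α → Int) (a : Int) :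
    l.foldl (fun acc x => acc + f x + g x) a = a + (l.map (fun x => f x + g x)).sum := by
  rw [show (fun (acc : Int) x => acc + f x + g x) = (fun acc x => acc + (f x + g x)) from
    funext fun acc => funext fun x => add_assoc _ _ _]
  exact PySem.List.foldl_add _ _ _

theorem solve_sum (n p r : Int) (hn : 3 ≤ n) :
    solve n p r =
      ∑ k ∈ Finset.range (n.toNat - 2 + 1), ∑ k2 ∈ Finset.range (n.toNat - 2 + 1 - k),
        (FF k (n.toNat - 2 - k - k2) k2 (p - 1) (r - 2)
         + FF k (n.toNat - 2 - k - k2) k2 (p - 2) (r - 1)) := by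
  have hN : ((n.toNat : Int)) = n := Int.toNat_of_nonneg (by omega)
  set N := n.toNat with hNdef
  have hN3 : 3 ≤ N := by omega
  rw [solve, if_neg (by omega), if_neg (by omega)]
  have inner_eq : ∀ (acc i : Int),
      (PySem.List.pyRange (i + 1) (n + 1) 1).foldl (fun acc2 j =>
        acc2 + bt (i - 1) (n - j) (n - 2 - (i - 1) - (n - j)) n (p - 1) (r - 2)
             + bt (i - 1) (n - j) (n - 2 - (i - 1) - (n - j)) n (p - 2) (r - 1)) acc
      = acc + ((PySem.List.pyRange (i + 1) (n + 1) 1).map (fun j =>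
          bt (i - 1) (n - j) (n - 2 - (i - 1) - (n - j)) n (p - 1) (r - 2)
          + bt (i - 1) (n - j) (n - 2 - (i - 1) - (n - j)) n (p - 2) (r - 1))).sum := by
    intro acc i
    exact foldl_add2 _ _ _ _
  rw [show (fun (acc i : Int) =>
      (PySem.List.pyRange (i + 1) (n + 1) 1).foldl (fun acc2 j =>
        acc2 + bt (i - 1) (n - j) (n - 2 - (i - 1) - (n - j)) n (p - 1) (r - 2)
             + bt (i - 1) (n - j) (n - 2 - (i - 1) - (n - j)) n (p - 2) (r - 1)) acc)
    = (fun acc i => acc + ((PySem.List.pyRange (i + 1) (n + 1) 1).map (fun j =>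
          bt (i - 1) (n - j) (n - 2 - (i - 1) - (n - j)) n (p - 1) (r - 2)
          + bt (i - 1) (n - j) (n - 2 - (i - 1) - (n - j)) n (p - 2) (r - 1))).sum)
    from funext fun acc => funext fun i => inner_eq acc i]
  rw [PySem.List.foldl_add, PySem.List.pyRange_one 1 (n + 1), List.map_map, zero_add,
      show (n + 1 - 1).toNat = N by omega, sum_map_range_eq]
  -- outer sum now over k < N with i = 1 + k
  have outer_congr : ∀ k ∈ Finset.range N,
      ((fun i => ((PySem.List.pyRange (i + 1) (n + 1) 1).map (fun j =>
          bt (i - 1) (n - j) (n - 2 - (i - 1) - (n - j)) n (p - 1) (r - 2)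
          + bt (i - 1) (n - j) (n - 2 - (i - 1) - (n - j)) n (p - 2) (r - 1))).sum) ∘
        (fun k : Nat => (1 : Int) + (k : Int))) k
      = ∑ k2 ∈ Finset.range (N - 1 - k),
          (FF k (N - 2 - k - k2) k2 (p - 1) (r - 2) + FF k (N - 2 - k - k2) k2 (p - 2) (r - 1)) := by
    intro k hk
    have hkN : k < N := Finset.mem_range.mp hk
    simp only [Function.comp]
    rw [PySem.List.pyRange_one (1 + (k : Int) + 1) (n + 1), List.map_map,
        show (n + 1 - (1 + (k : Int) + 1)).toNat = N - 1 - k by omega, sum_map_range_eq]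
    apply Finset.sum_congr rfl
    intro k2 hk2
    have hk2' : k2 < N - 1 - k := Finset.mem_range.mp hk2
    simp only [Function.comp]
    rw [show (1 + (k : Int) - 1) = ((k : Nat) : Int) by ring]
    rw [show n - (1 + (k : Int) + 1 + (k2 : Int)) = ((N - 2 - k - k2 : Nat) : Int) by omega]
    rw [show n - 2 - ((k : Nat) : Int) - ((N - 2 - k - k2 : Nat) : Int) = ((k2 : Nat) : Int) by omega]
    rw [bt_eq_FF, bt_eq_FF]
  rw [Finset.sum_congr rfl outer_congr]
  -- split off the last (empty) outer term: range N = range ((N-2+1) + 1)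
  rw [show N = (N - 2 + 1) + 1 by omega, Finset.sum_range_succ,
      show N - 2 + 1 + 1 - 1 - (N - 2 + 1) = 0 by omega]
  simp only [Finset.range_zero, Finset.sum_empty, add_zero]
  apply Finset.sum_congr rfl
  intro k hk
  have : k < N - 2 + 1 := Finset.mem_range.mp hk
  rw [show N - 2 + 1 + 1 - 1 - k = N - 2 + 1 - k by omega,
      show N - 2 + 1 + 1 - 2 + 1 - k = N - 2 + 1 - k by omega]

theorem getD_map_range' (h : Nat → Int) (c k : Nat) (hk : k < c) :
    (List.map h (List.range c)).getD k 0 = h k := by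
  rw [List.getD_eq_getElem?_getD, List.getElem?_map, List.getElem?_range hk]
  rfl

theorem stir_succ (m k : Nat) :
    stir (m + 1) k = m * stir m k + (if k = 0 then 0 else stir m (k - 1)) := by
  cases k with
  | zero => rw [stir, if_pos rfl, add_zero]
  | succ j => rw [stir, if_neg (by omega)]; simp

theorem gRow_map_range (f : Nat → Int) (c k : Nat) (hk : k < c) :
    gRow ((List.range c).map f) (k : Int) = f k := by
  rw [gRow, if_pos (by simp; omega), PySem.List.pyGetD_natCast, getD_map_range' _ _ _ hk]

theorem upStir_spec (l kc : Nat) (hl : 1 ≤ l) :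
    upStir ((List.range (min (l - 1) kc + 1)).map (stir (l - 1))) (l : Int) (kc : Int)
      = (List.range (min l kc + 1)).map (stir l) := by
  rw [upStir]
  have hmin : (min (l : Int) (kc : Int) + 1) = ((min l kc + 1 : Nat) : Int) := by
    push_cast; omega
  rw [hmin, PySem.List.pyRange_zero_natCast (min l kc + 1), List.map_map]
  apply List.map_congr_left
  intro k hk
  have hkm : k < min l kc + 1 := List.mem_range.mp hk
  simp only [Function.comp]
  have hlen : ((List.range (min (l - 1) kc + 1)).map (stir (l - 1))).length
      = min (l - 1) kc + 1 := by simp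
  rw [hlen]
  obtain ⟨m, rfl⟩ : ∃ m, l = m + 1 := ⟨l - 1, by omega⟩
  have hm1 : m + 1 - 1 = m := by omega
  rw [hm1]
  by_cases h1 : k < min m kc + 1
  · rw [if_pos (by exact_mod_cast Int.ofNat_lt.mpr h1), PySem.List.pyGetD_natCast,
        getD_map_range' _ _ _ h1]
    cases k with
    | zero =>
      rw [if_neg (by omega), stir_succ, if_pos rfl]
      push_cast; ring
    | succ j =>
      rw [if_pos (by omega),
          show ((j + 1 : Nat) : Int) - 1 = ((j : Nat) : Int) by push_cast; ring,
          PySem.List.pyGetD_natCast, getD_map_range' _ _ _ (by omega)]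
      rw [stir_succ, if_neg (by omega), Nat.add_sub_cancel]
      push_cast; ring
  · -- k = m + 1 ≤ kc, beyond the previous row: stir m k = 0 anyway
    have hk2 : k = m + 1 := by omega
    subst hk2
    rw [if_neg (by push_cast; omega), if_pos (by push_cast; omega),
        show ((m + 1 : Nat) : Int) - 1 = ((m : Nat) : Int) by push_cast; ring,
        PySem.List.pyGetD_natCast, getD_map_range' _ _ _ (by omega)]
    rw [stir_succ, if_neg (by omega), Nat.add_sub_cancel,
        stir_eq_zero (by omega : m < m + 1)]

theorem upPas_spec (a : Nat) (ha : 1 ≤ a) :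
    upPas ((List.range a).map (fun b => ((a - 1).choose b : Int))) (a : Int)
      = (List.range (a + 1)).map (fun b => (a.choose b : Int)) := by
  rw [upPas, show (a : Int) + 1 = ((a + 1 : Nat) : Int) by push_cast; ring,
      PySem.List.pyRange_zero_natCast (a + 1), List.map_map]
  apply List.map_congr_left
  intro k hk
  have hkm : k < a + 1 := List.mem_range.mp hk
  simp only [Function.comp]
  obtain ⟨m, rfl⟩ : ∃ m, a = m + 1 := ⟨a - 1, by omega⟩
  have hm1 : m + 1 - 1 = m := by omega
  rw [hm1]
  by_cases h1 : k < m + 1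
  · rw [if_pos (by exact_mod_cast Int.ofNat_lt.mpr h1), PySem.List.pyGetD_natCast,
        getD_map_range' _ _ _ h1]
    cases k with
    | zero => rw [if_neg (by omega)]; simp
    | succ j =>
      rw [if_pos (by omega),
          show ((j + 1 : Nat) : Int) - 1 = ((j : Nat) : Int) by push_cast; ring,
          PySem.List.pyGetD_natCast, getD_map_range' _ _ _ (by omega),
          Nat.choose_succ_succ]
      push_cast; ring
  · have hk2 : k = m + 1 := by omega
    subst hk2
    rw [if_neg (by push_cast; omega), if_pos (by push_cast; omega),
        show ((m + 1 : Nat) : Int) - 1 = ((m : Nat) : Int) by push_cast; ring,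
        PySem.List.pyGetD_natCast, getD_map_range' _ _ _ (by omega)]
    simp [Nat.choose_self]

theorem gRow_trunc (l kcN : Nat) (c : Int) (hc : c ≤ (kcN : Int)) :
    gRow ((List.range (min l kcN + 1)).map (stir l)) c = stirI l c := by
  rw [gRow]
  have hlen : ((List.range (min l kcN + 1)).map (stir l)).length = min l kcN + 1 := by simp
  rw [hlen]
  unfold stirI
  by_cases h : 0 ≤ c ∧ c < ((min l kcN + 1 : Nat) : Int)
  · rw [if_pos (by exact_mod_cast h), if_pos (by omega),
        show c = ((c.toNat : Nat) : Int) by omega, PySem.List.pyGetD_natCast,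
        getD_map_range' _ _ _ (by omega), Int.toNat_natCast]
  · rw [if_neg (by exact_mod_cast h)]
    by_cases h2 : 0 ≤ c ∧ c ≤ (l : Int)
    · -- then c ≥ min l kc + 1 with c ≤ kc forces min = l, i.e. c > l: contradiction
      exfalso
      have : ((min l kcN + 1 : Nat) : Int) ≤ c := by omega
      omega
    · rw [if_neg h2]

theorem stirPass_spec (p r : Int) (kcN : Nat)
    (hp1 : p - 1 ≤ (kcN : Int)) (hr1 : r - 1 ≤ (kcN : Int)) (c : Nat) :
    (PySem.List.pyRange 0 (c : Int) 1).foldl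
      (fun (s : List Int × List Int × List Int × List Int × List Int) l =>
        let row := if 0 < l then upStir s.1 l (kcN : Int) else s.1
        (row, s.2.1 ++ [gRow row (p - 1)], s.2.2.1 ++ [gRow row (p - 2)],
         s.2.2.2.1 ++ [gRow row (r - 2)], s.2.2.2.2 ++ [gRow row (r - 1)]))
      ([1], [], [], [], [])
    = ((List.range (min (c - 1) kcN + 1)).map (stir (c - 1)),
       (List.range c).map (fun l => stirI l (p - 1)),
       (List.range c).map (fun l => stirI l (p - 2)),
       (List.range c).map (fun l => stirI l (r - 2)),
       (List.range c).map (fun l => stirI l (r - 1))) := by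
  induction c with
  | zero =>
    rw [PySem.List.pyRange_one_eq_nil (by omega)]
    simp [stir]
  | succ c ih =>
    rw [show ((c + 1 : Nat) : Int) = (c : Int) + 1 by push_cast; ring,
        PySem.List.pyRange_one_succ_right (by omega), List.foldl_append, ih]
    simp only [List.foldl]
    have hrow : (if 0 < (c : Int) then
          upStir ((List.range (min (c - 1) kcN + 1)).map (stir (c - 1))) (c : Int) (kcN : Int)
        else ((List.range (min (c - 1) kcN + 1)).map (stir (c - 1))))
        = (List.range (min c kcN + 1)).map (stir c) := by
      cases c with
      | zero => rw [if_neg (by omega)]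
      | succ d =>
        rw [if_pos (by omega), show (d + 1) - 1 = d by omega]
        exact upStir_spec (d + 1) kcN (by omega)
    rw [hrow]
    rw [gRow_trunc c kcN (p - 1) hp1, gRow_trunc c kcN (p - 2) (by omega),
        gRow_trunc c kcN (r - 2) (by omega), gRow_trunc c kcN (r - 1) hr1]
    rw [show (c + 1) - 1 = c by omega]
    simp [List.range_succ]

theorem facPass_spec (c : Nat) :
    (PySem.List.pyRange 1 ((c : Int) + 1) 1).foldl
      (fun fl i => fl ++ [PySem.List.pyGetD fl (i - 1) 0 * i]) [1]
    = (List.range (c + 1)).map (fun i => (i.factorial : Int)) := by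
  induction c with
  | zero =>
    rw [PySem.List.pyRange_one_eq_nil (by omega)]
    simp [Nat.factorial]
  | succ c ih =>
    rw [show ((c + 1 : Nat) : Int) + 1 = ((c : Int) + 1) + 1 by push_cast; ring,
        PySem.List.pyRange_one_succ_right (by omega), List.foldl_append, ih]
    simp only [List.foldl]
    rw [show (c : Int) + 1 - 1 = ((c : Nat) : Int) by ring,
        PySem.List.pyGetD_natCast, getD_map_range' _ _ _ (by omega)]
    have hfs : (c.factorial : Int) * ((c : Int) + 1) = ((c + 1).factorial : Int) := by
      rw [Nat.factorial_succ]; push_cast; ring_nf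
    rw [hfs]
    simp [List.range_succ]

theorem pasPass_spec (c : Nat) :
    (PySem.List.pyRange 1 ((c : Int) + 1) 1).foldl (fun rw a => upPas rw a) [1]
    = (List.range (c + 1)).map (fun b => (c.choose b : Int)) := by
  induction c with
  | zero =>
    rw [PySem.List.pyRange_one_eq_nil (by omega)]
    simp
  | succ c ih =>
    rw [show ((c + 1 : Nat) : Int) + 1 = ((c : Int) + 1) + 1 by push_cast; ring,
        PySem.List.pyRange_one_succ_right (by omega), List.foldl_append, ih]
    simp only [List.foldl]
    have := upPas_spec (c + 1) (by omega)
    rw [show ((c + 1 : Nat) : Int) = (c : Int) + 1 by push_cast; ring,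
        show (c + 1) - 1 = c by omega] at this
    rw [show ((c : Nat) : Int) + 1 = ((c + 1 : Nat) : Int) by push_cast; ring]
    exact this

theorem innerFold_spec (p r : Int) (mN a : Nat) (ha : a ≤ mN) (T0 : Int) :
    (PySem.List.pyRange 0 ((a : Int) + 1) 1).foldl (fun tt t =>
      let sv := PySem.List.pyGetD ((List.range (mN + 1)).map (fun l => stirI l (p - 1))) ((mN : Int) - (a : Int)) 0
                  * PySem.List.pyGetD ((List.range (mN + 1)).map (fun l => stirI l (r - 2))) t 0
                + PySem.List.pyGetD ((List.range (mN + 1)).map (fun l => stirI l (p - 2))) ((mN : Int) - (a : Int)) 0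
                  * PySem.List.pyGetD ((List.range (mN + 1)).map (fun l => stirI l (r - 1))) t 0
      if sv ≠ 0 then
        tt + sv * (gRow ((List.range (mN + 1)).map (fun b => (mN.choose b : Int))) ((mN : Int) - (a : Int))
          * gRow ((List.range (a + 1)).map (fun b => (a.choose b : Int))) t
          * gRow ((List.range (mN + 1)).map (fun i => (i.factorial : Int))) ((a : Int) - t))
      else tt) T0
    = T0 + ∑ t ∈ Finset.range (a + 1),
        (FF (mN - a) t (a - t) (p - 1) (r - 2) + FF (mN - a) t (a - t) (p - 2) (r - 1)) := by
  have hstep : (fun (tt : Int) (t : Int) =>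
      let sv := PySem.List.pyGetD ((List.range (mN + 1)).map (fun l => stirI l (p - 1))) ((mN : Int) - (a : Int)) 0
                  * PySem.List.pyGetD ((List.range (mN + 1)).map (fun l => stirI l (r - 2))) t 0
                + PySem.List.pyGetD ((List.range (mN + 1)).map (fun l => stirI l (p - 2))) ((mN : Int) - (a : Int)) 0
                  * PySem.List.pyGetD ((List.range (mN + 1)).map (fun l => stirI l (r - 1))) t 0
      if sv ≠ 0 then
        tt + sv * (gRow ((List.range (mN + 1)).map (fun b => (mN.choose b : Int))) ((mN : Int) - (a : Int))
          * gRow ((List.range (a + 1)).map (fun b => (a.choose b : Int))) t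
          * gRow ((List.range (mN + 1)).map (fun i => (i.factorial : Int))) ((a : Int) - t))
      else tt)
    = (fun tt t =>
        tt + (PySem.List.pyGetD ((List.range (mN + 1)).map (fun l => stirI l (p - 1))) ((mN : Int) - (a : Int)) 0
                  * PySem.List.pyGetD ((List.range (mN + 1)).map (fun l => stirI l (r - 2))) t 0
                + PySem.List.pyGetD ((List.range (mN + 1)).map (fun l => stirI l (p - 2))) ((mN : Int) - (a : Int)) 0
                  * PySem.List.pyGetD ((List.range (mN + 1)).map (fun l => stirI l (r - 1))) t 0)
           * (gRow ((List.range (mN + 1)).map (fun b => (mN.choose b : Int))) ((mN : Int) - (a : Int))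
          * gRow ((List.range (a + 1)).map (fun b => (a.choose b : Int))) t
          * gRow ((List.range (mN + 1)).map (fun i => (i.factorial : Int))) ((a : Int) - t))) := by
    funext tt t
    dsimp only
    by_cases hsv : (PySem.List.pyGetD ((List.range (mN + 1)).map (fun l => stirI l (p - 1))) ((mN : Int) - (a : Int)) 0
                  * PySem.List.pyGetD ((List.range (mN + 1)).map (fun l => stirI l (r - 2))) t 0
                + PySem.List.pyGetD ((List.range (mN + 1)).map (fun l => stirI l (p - 2))) ((mN : Int) - (a : Int)) 0
                  * PySem.List.pyGetD ((List.range (mN + 1)).map (fun l => stirI l (r - 1))) t 0) = 0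
    · rw [if_neg (not_not_intro hsv), hsv]
      ring
    · rw [if_pos hsv]
  rw [hstep, PySem.List.foldl_add]
  congr 1
  rw [show (a : Int) + 1 = ((a + 1 : Nat) : Int) by push_cast; ring,
      PySem.List.pyRange_zero_natCast (a + 1), List.map_map, sum_map_range_eq]
  apply Finset.sum_congr rfl
  intro t ht
  have ht' : t < a + 1 := Finset.mem_range.mp ht
  simp only [Function.comp]
  rw [show (mN : Int) - (a : Int) = ((mN - a : Nat) : Int) by omega,
      show (a : Int) - (t : Nat) = ((a - t : Nat) : Int) by omega,
      PySem.List.pyGetD_natCast, PySem.List.pyGetD_natCast,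
      PySem.List.pyGetD_natCast, PySem.List.pyGetD_natCast,
      getD_map_range' _ _ _ (by omega), getD_map_range' _ _ _ (by omega),
      getD_map_range' _ _ _ (by omega), getD_map_range' _ _ _ (by omega),
      gRow_map_range _ _ _ (by omega), gRow_map_range _ _ _ (by omega),
      gRow_map_range _ _ _ (by omega)]
  unfold FF
  rw [show (mN - a) + t + (a - t) = mN by omega, show t + (a - t) = a by omega]
  ring

theorem loopPass_spec (p r : Int) (mN : Nat) (c : Nat) (hc : c ≤ mN + 1) :
    (PySem.List.pyRange 0 (c : Int) 1).foldl
      (fun (s : List Int × Int) a =>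
        let crow := if 0 < a then upPas s.1 a else s.1
        let l := (mN : Int) - a
        let total := (PySem.List.pyRange 0 (a + 1) 1).foldl (fun tt t =>
          let sv := PySem.List.pyGetD ((List.range (mN + 1)).map (fun l => stirI l (p - 1))) l 0
                      * PySem.List.pyGetD ((List.range (mN + 1)).map (fun l => stirI l (r - 2))) t 0
                    + PySem.List.pyGetD ((List.range (mN + 1)).map (fun l => stirI l (p - 2))) l 0
                      * PySem.List.pyGetD ((List.range (mN + 1)).map (fun l => stirI l (r - 1))) t 0
          if sv ≠ 0 then
            tt + sv * (gRow ((List.range (mN + 1)).map (fun b => (mN.choose b : Int))) l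
              * gRow crow t
              * gRow ((List.range (mN + 1)).map (fun i => (i.factorial : Int))) (a - t))
          else tt) s.2
        (crow, total)) ([1], 0)
    = ((List.range ((c - 1) + 1)).map (fun b => ((c - 1).choose b : Int)),
       ∑ a ∈ Finset.range c, ∑ t ∈ Finset.range (a + 1),
         (FF (mN - a) t (a - t) (p - 1) (r - 2) + FF (mN - a) t (a - t) (p - 2) (r - 1))) := by
  induction c with
  | zero =>
    rw [PySem.List.pyRange_one_eq_nil (by omega)]
    simp
  | succ c ih =>
    rw [show ((c + 1 : Nat) : Int) = (c : Int) + 1 by push_cast; ring,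
        PySem.List.pyRange_one_succ_right (by omega), List.foldl_append,
        ih (by omega)]
    simp only [List.foldl]
    have hcrow : (if 0 < (c : Int) then
          upPas ((List.range ((c - 1) + 1)).map (fun b => ((c - 1).choose b : Int))) (c : Int)
        else ((List.range ((c - 1) + 1)).map (fun b => ((c - 1).choose b : Int))))
        = (List.range (c + 1)).map (fun b => (c.choose b : Int)) := by
      cases c with
      | zero => rw [if_neg (by omega)]
      | succ d =>
        rw [if_pos (by omega), show (d + 1) - 1 + 1 = d + 1 by omega]
        have := upPas_spec (d + 1) (by omega)
        rw [show (d + 1) - 1 = d by omega] at this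
        exact_mod_cast this
    rw [hcrow, innerFold_spec p r mN c (by omega), show (c + 1) - 1 = c by omega]
    exact Prod.ext rfl (by
      rw [Finset.sum_range_succ (fun a => ∑ t ∈ Finset.range (a + 1),
        (FF (mN - a) t (a - t) (p - 1) (r - 2) + FF (mN - a) t (a - t) (p - 2) (r - 1))) c])

theorem solve_alt_sum (n p r : Int) (hn : 3 ≤ n) :
    solve_alt n p r =
      ∑ k ∈ Finset.range (n.toNat - 2 + 1), ∑ t ∈ Finset.range (n.toNat - 2 + 1 - k),
        (FF k t (n.toNat - 2 - k - t) (p - 1) (r - 2)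
         + FF k t (n.toNat - 2 - k - t) (p - 2) (r - 1)) := by
  have hN : ((n.toNat : Int)) = n := Int.toNat_of_nonneg (by omega)
  set N := n.toNat with hNdef
  have hN3 : 3 ≤ N := by omega
  set mN := N - 2 with hmdef
  set kcN := (max (max (p - 1) (r - 1)) 0).toNat with hkcdef
  rw [solve_alt, if_neg (by omega), if_neg (by omega)]
  dsimp only
  rw [show n - 2 = ((mN : Nat) : Int) by omega,
      show max (max (p - 1) (r - 1)) 0 = ((kcN : Nat) : Int) by omega,
      show ((mN : Nat) : Int) + 1 = ((mN + 1 : Nat) : Int) by push_cast; ring,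
      stirPass_spec p r kcN (by omega) (by omega) (mN + 1)]
  dsimp only
  rw [show ((mN + 1 : Nat) : Int) = ((mN : Nat) : Int) + 1 by push_cast; ring,
      facPass_spec mN, pasPass_spec mN,
      show ((mN : Nat) : Int) + 1 = ((mN + 1 : Nat) : Int) by push_cast; ring,
      loopPass_spec p r mN (mN + 1) (le_refl _)]
  dsimp only
  rw [← Finset.sum_range_reflect (fun k => ∑ t ∈ Finset.range (mN + 1 - k),
      (FF k t (mN - k - t) (p - 1) (r - 2) + FF k t (mN - k - t) (p - 2) (r - 1))) (mN + 1)]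
  apply Finset.sum_congr rfl
  intro a ha
  have ha' : a < mN + 1 := Finset.mem_range.mp ha
  rw [show mN + 1 - 1 - a = mN - a by omega, show mN + 1 - (mN - a) = a + 1 by omega]
  apply Finset.sum_congr rfl
  intro t ht
  have ht' : t < a + 1 := Finset.mem_range.mp ht
  rw [show mN - (mN - a) - t = a - t by omega]

-- ===== VERDICT (by name: the statement is the Claim_ definition above) =====
theorem solve_spec : Claim_equal_solve := by
  intro n p r _
  unfold Spec_solve
  by_cases h1 : n = 1
  · rw [solve, solve_alt, if_pos h1, if_pos h1]
  · by_cases h2 : n = 2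
    · rw [solve, solve_alt, if_neg h1, if_neg h1, if_pos h2, if_pos h2]
      split_ifs with ha hb hc hd <;> first | rfl | (exfalso; tauto)
    · by_cases h3 : 3 ≤ n
      · rw [solve_sum n p r h3, solve_alt_sum n p r h3]
        apply Finset.sum_congr rfl
        intro k hk
        rw [← Finset.sum_range_reflect (fun t =>
          FF k t (n.toNat - 2 - k - t) (p - 1) (r - 2)
          + FF k t (n.toNat - 2 - k - t) (p - 2) (r - 1)) (n.toNat - 2 + 1 - k)]
        apply Finset.sum_congr rfl
        intro k2 hk2
        have hk' : k < n.toNat - 2 + 1 := Finset.mem_range.mp hk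
        have hk2' : k2 < n.toNat - 2 + 1 - k := Finset.mem_range.mp hk2
        rw [show n.toNat - 2 + 1 - k - 1 - k2 = n.toNat - 2 - k - k2 by omega,
            show n.toNat - 2 - k - (n.toNat - 2 - k - k2) = k2 by omega]
      · -- n ≤ 0 : both double loops are empty
        have hn0 : n ≤ 0 := by omega
        rw [solve, solve_alt, if_neg h1, if_neg h1, if_neg h2, if_neg h2,
            PySem.List.pyRange_one_eq_nil (by omega : n + 1 ≤ 1)]
        dsimp only
        rw [PySem.List.pyRange_one_eq_nil (by omega : n - 2 + 1 ≤ 0)]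
        rfl
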